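-- pv_equiv track=rewrite | github.com/viktoria-hurtisova/master-thesis_scripts | analyze_smt2_formula.py | parse_z3_output_clauses
-- ===== SOURCE A (Python) =====
-- def parse_sexpr(token_iter):
--     """Parses a single S-expression from a token iterator."""
--     sexpr = []
--     try:
--         for token in token_iter:
--             if token == '(':
--                 sexpr.append(parse_sexpr(token_iter))
--             elif token == ')':
--                 return sexpr
--             else:
--                 sexpr.append(token)
--     except StopIteration:
--         pass
--     return sexpr
--
-- def tokenize(text):
--     """Tokenizes S-expressions, handling simple parentheses."""
--     # Add spaces around parens and split
--     # This is a naive tokenizer that assumes no string literals with parens.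
--     return text.replace('(', ' ( ').replace(')', ' ) ').split()
--
-- def parse_z3_output_clauses(output):
--     """Parses Z3 output to count clauses in goals."""
--     tokens = tokenize(output)
--     if not tokens:
--         return 0
--
--     iter_tokens = iter(tokens)
--     roots = []
--
--     # Parse all top-level S-expressions
--     try:
--         while True:
--             t = next(iter_tokens)
--             if t == '(':
--                 roots.append(parse_sexpr(iter_tokens))
--             # Ignore atoms at top level (usually solver prints nothing else top-level except errors or parens)
--     except StopIteration:
--         pass
--
--     total_clauses = 0
--
--     for root in roots:
--         # We look for a list starting with "goals"
--         if isinstance(root, list) and len(root) > 0 and root[0] == 'goals':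
--             # Iterate over 'goal' children
--             for goal in root[1:]:
--                 if isinstance(goal, list) and len(goal) > 0 and goal[0] == 'goal':
--                     # Inside a goal
--                     # Structure: ('goal', clause1, clause2, ..., key, val, key, val)
--                     # We iterate elements skipping the first 'goal'
--                     i = 1
--                     while i < len(goal):
--                         item = goal[i]
--
--                         # Check if it is a keyword
--                         if isinstance(item, str) and item.startswith(':'):
--                             # It's a keyword like :precision
--                             # Skip this and the next item (value)
--                             i += 2
--                         else:
--                             # It's a clause
--                             total_clauses += 1
--                             i += 1
--
--     return total_clauses
-- ===== SOURCE B (Python) =====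
-- def parse_z3_output_clauses(output):
--     """Single-pass token scan: an explicit stack of frame roles replaces the recursive parse tree."""
--     tokens = output.replace('(', ' ( ').replace(')', ' ) ').split()
--     count = 0
--     stack = []  # roles: 'goals?', 'goals', 'goal?', 'goal', 'goal_skip', 'other'
--     for t in tokens:
--         if t == '(':
--             child = 'other'
--             if not stack:
--                 child = 'goals?'
--             else:
--                 top = stack[-1]
--                 if top == 'goals':
--                     child = 'goal?'
--                 elif top == 'goal':
--                     count += 1
--                 elif top == 'goal_skip':
--                     stack[-1] = 'goal'
--                 elif top == 'goals?' or top == 'goal?':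
--                     stack[-1] = 'other'
--             stack.append(child)
--         elif t == ')':
--             if stack:
--                 stack.pop()
--         elif stack:
--             top = stack[-1]
--             if top == 'goals?':
--                 stack[-1] = 'goals' if t == 'goals' else 'other'
--             elif top == 'goal?':
--                 stack[-1] = 'goal' if t == 'goal' else 'other'
--             elif top == 'goal_skip':
--                 stack[-1] = 'goal'
--             elif top == 'goal':
--                 if t.startswith(':'):
--                     stack[-1] = 'goal_skip'
--                 else:
--                     count += 1
--     return count
-- ===== Notes on version B (the rewrite author's own statement) =====
-- stated objective: alternative
-- what changed: Replaces recursive S-expression parsing into a tree followed by a counting walk with a single iterative pass over the tokens that maintains an explicit stack of frame roles (goals?/goals/goal?/goal/goal_skip/other) and counts clauses on the fly, never building the tree.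
import Mathlib
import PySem

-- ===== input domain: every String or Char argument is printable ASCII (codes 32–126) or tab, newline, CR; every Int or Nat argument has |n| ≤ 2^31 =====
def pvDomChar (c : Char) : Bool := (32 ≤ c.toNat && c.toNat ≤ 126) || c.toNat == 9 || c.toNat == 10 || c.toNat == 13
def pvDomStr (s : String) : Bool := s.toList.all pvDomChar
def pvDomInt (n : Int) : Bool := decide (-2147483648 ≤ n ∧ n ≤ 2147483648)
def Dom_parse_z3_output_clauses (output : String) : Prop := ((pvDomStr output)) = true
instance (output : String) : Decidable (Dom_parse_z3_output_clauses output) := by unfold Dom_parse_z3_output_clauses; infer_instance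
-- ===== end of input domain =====

-- B replaces A's recursive tree-building parser + counting walk by a single iterative
-- pass over the tokens with an explicit stack of frame roles (alternative decomposition,
-- same cost; proved to return the same count).

-- ===== PORT A =====

-- Python's nested lists of strings, encoded as cons-cells (a list is nil or cons;
-- an item is an atom or itself a list).
inductive Sexpr where
  | atom : String → Sexpr
  | nil : Sexpr
  | cons : Sexpr → Sexpr → Sexpr
deriving DecidableEq, Repr

-- the items of a list-value, as a Lean list (atoms have no items)
def Sexpr.toList : Sexpr → List Sexpr
  | .atom _ => []
  | .nil => []
  | .cons x xs => x :: Sexpr.toList xs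

def tokenizeA (text : String) : List String :=
  PySem.Str.split₀ (PySem.Str.replace (PySem.Str.replace text "(" " ( ") ")" " ) ")

-- parse_sexpr: the 'for token in token_iter' loop as the obvious recursion on the
-- remaining tokens; fuel only makes the recursion total (fuel ≥ tokens.length suffices
-- and the caller passes exactly that).
def parseSexpr : Nat → List String → Sexpr × List String
  | _, [] => (.nil, [])
  | 0, ts => (.nil, ts)
  | f + 1, t :: rest =>
    if t = ")" then (.nil, rest)
    else if t = "(" then
      (.cons (parseSexpr f rest).1 (parseSexpr f (parseSexpr f rest).2).1,
        (parseSexpr f (parseSexpr f rest).2).2)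
    else (.cons (.atom t) (parseSexpr f rest).1, (parseSexpr f rest).2)

-- the top-level 'while True: t = next(iter_tokens)' loop
def parseTop : Nat → List String → List Sexpr
  | _, [] => []
  | 0, _ => []
  | f + 1, t :: rest =>
    if t = "(" then (parseSexpr f rest).1 :: parseTop f (parseSexpr f rest).2
    else parseTop f rest

-- the 'while i < len(goal)' loop
def countGoalItems (goal : List Sexpr) (i : Nat) (total : Int) : Int :=
  if h : i < goal.length then
    match goal[i] with
    | .atom s =>
      if PySem.Str.startswith s ":" then countGoalItems goal (i + 2) total
      else countGoalItems goal (i + 1) (total + 1)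
    | _ => countGoalItems goal (i + 1) (total + 1)
  else total
termination_by goal.length - i

-- the 'for goal in root[1:]' loop (accumulator = total_clauses)
def countGoals : List Sexpr → Int → Int
  | [], total => total
  | .cons (.atom g) gt :: rest, total =>
    if g = "goal" then
      countGoals rest (countGoalItems (Sexpr.toList (.cons (.atom g) gt)) 1 total)
    else countGoals rest total
  | .atom _ :: rest, total => countGoals rest total
  | .nil :: rest, total => countGoals rest total
  | .cons (.nil) _ :: rest, total => countGoals rest total
  | .cons (.cons _ _) _ :: rest, total => countGoals rest total

-- the 'for root in roots' loop
def countRoots : List Sexpr → Int → Int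
  | [], total => total
  | .cons (.atom s) t :: rest, total =>
    if s = "goals" then countRoots rest (countGoals (Sexpr.toList t) total)
    else countRoots rest total
  | .atom _ :: rest, total => countRoots rest total
  | .nil :: rest, total => countRoots rest total
  | .cons (.nil) _ :: rest, total => countRoots rest total
  | .cons (.cons _ _) _ :: rest, total => countRoots rest total

def parse_z3_output_clauses (output : String) : Int :=
  let tokens := tokenizeA output
  if tokens = [] then 0
  else countRoots (parseTop tokens.length tokens) 0

-- ===== PORT B =====

inductive PFrame where
  | goalsCand | goals | goalCand | goal | goalSkip | other
deriving DecidableEq, Repr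

def stepB (st : Int × List PFrame) (t : String) : Int × List PFrame :=
  let (c, stack) := st
  if t = "(" then
    match stack with
    | [] => (c, PFrame.goalsCand :: [])
    | top :: rest =>
      match top with
      | .goals => (c, PFrame.goalCand :: top :: rest)
      | .goal => (c + 1, PFrame.other :: top :: rest)
      | .goalSkip => (c, PFrame.other :: PFrame.goal :: rest)
      | .goalsCand => (c, PFrame.other :: PFrame.other :: rest)
      | .goalCand => (c, PFrame.other :: PFrame.other :: rest)
      | .other => (c, PFrame.other :: top :: rest)
  else if t = ")" then
    match stack with
    | [] => (c, [])
    | _ :: rest => (c, rest)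
  else
    match stack with
    | [] => (c, [])
    | top :: rest =>
      match top with
      | .goalsCand => (c, (if t = "goals" then PFrame.goals else PFrame.other) :: rest)
      | .goalCand => (c, (if t = "goal" then PFrame.goal else PFrame.other) :: rest)
      | .goalSkip => (c, PFrame.goal :: rest)
      | .goal =>
        if PySem.Str.startswith t ":" then (c, PFrame.goalSkip :: rest)
        else (c + 1, top :: rest)
      | .goals => (c, top :: rest)
      | .other => (c, top :: rest)

def parse_z3_output_clauses_alt (output : String) : Int :=
  let tokens := PySem.Str.split₀
    (PySem.Str.replace (PySem.Str.replace output "(" " ( ") ")" " ) ")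
  (tokens.foldl stepB ((0 : Int), ([] : List PFrame))).1

-- ===== PRECONDITION & SPEC =====
def Spec_parse_z3_output_clauses (output : String) (out : Int) : Prop := out = parse_z3_output_clauses_alt output
instance (output : String) (out : Int) : Decidable (Spec_parse_z3_output_clauses output out) := by unfold Spec_parse_z3_output_clauses; infer_instance

-- ===== CLAIM (what is proved, stated in full; the proofs are below) =====
def Claim_equal_parse_z3_output_clauses : Prop := ∀ (output : String), Dom_parse_z3_output_clauses output → Spec_parse_z3_output_clauses output (parse_z3_output_clauses output)

-- ===== LEMMAS AND PROOFS =====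

-- count contributed by the items of a list-value whose frame role starts as fr
def inc : PFrame → Sexpr → Int
  | _, .atom _ => 0
  | _, .nil => 0
  | .other, .cons _ _ => 0
  | .goalsCand, .cons (.atom s) xs => if s = "goals" then inc .goals xs else 0
  | .goalsCand, .cons .nil _ => 0
  | .goalsCand, .cons (.cons _ _) _ => 0
  | .goals, .cons (.atom _) xs => inc .goals xs
  | .goals, .cons (.nil) xs => inc .goalCand .nil + inc .goals xs
  | .goals, .cons (.cons a b) xs => inc .goalCand (.cons a b) + inc .goals xs
  | .goalCand, .cons (.atom s) xs => if s = "goal" then inc .goal xs else 0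
  | .goalCand, .cons .nil _ => 0
  | .goalCand, .cons (.cons _ _) _ => 0
  | .goalSkip, .cons _ xs => inc .goal xs
  | .goal, .cons (.atom s) xs =>
    if PySem.Str.startswith s ":" then inc .goalSkip xs else 1 + inc .goal xs
  | .goal, .cons .nil xs => 1 + inc .goal xs
  | .goal, .cons (.cons _ _) xs => 1 + inc .goal xs

def sumRoots : List Sexpr → Int
  | [] => 0
  | r :: rs => inc .goalsCand r + sumRoots rs

theorem inc_atom (fr : PFrame) (s : String) : inc fr (.atom s) = 0 := by
  cases fr <;> rfl

theorem inc_nil (fr : PFrame) : inc fr .nil = 0 := by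
  cases fr <;> rfl

theorem inc_other (x : Sexpr) : inc .other x = 0 := by
  cases x <;> rfl

theorem parseSexpr_length (f : Nat) (ts : List String) :
    (parseSexpr f ts).2.length ≤ ts.length := by
  induction f generalizing ts with
  | zero => cases ts <;> simp [parseSexpr]
  | succ f ih =>
    cases ts with
    | nil => simp [parseSexpr]
    | cons t rest =>
      by_cases h1 : t = ")" <;> by_cases h2 : t = "(" <;>
        simp [parseSexpr, h1, h2]
      · exact le_trans (le_trans (ih _) (ih rest)) (Nat.le_succ _)
      · exact Nat.le_succ_of_le (ih rest)

def Sexpr.isAtom : Sexpr → Bool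
  | .atom _ => true
  | .nil => false
  | .cons _ _ => false

theorem parseSexpr_isAtom (f : Nat) (ts : List String) :
    ((parseSexpr f ts).1).isAtom = false := by
  cases f with
  | zero => cases ts <;> simp [parseSexpr, Sexpr.isAtom]
  | succ f =>
    cases ts with
    | nil => simp [parseSexpr, Sexpr.isAtom]
    | cons t rest =>
      by_cases h1 : t = ")" <;> by_cases h2 : t = "(" <;>
        simp [parseSexpr, h1, h2, Sexpr.isAtom]

-- how inc behaves when the first item is a list-value (pushed frame + parent frame)
theorem inc_cons_nonatom (fr : PFrame) (ch sib : Sexpr) (h : ch.isAtom = false) :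
    inc fr (.cons ch sib) =
      (if fr = .goal then 1 else 0) +
      inc (if fr = .goals then .goalCand else .other) ch +
      inc (match fr with | .goalSkip => .goal | .goal => .goal | .goals => .goals | _ => .other) sib := by
  cases fr <;> cases ch <;> simp_all [inc, Sexpr.isAtom, inc_other]

-- skip-flag recursion over a plain list of items, matching A's while-loop
def gItems : Bool → List Sexpr → Int
  | _, [] => 0
  | true, _ :: xs => gItems false xs
  | false, (.atom s) :: xs =>
    if PySem.Str.startswith s ":" then gItems true xs else 1 + gItems false xs
  | false, .nil :: xs => 1 + gItems false xs
  | false, .cons _ _ :: xs => 1 + gItems false xs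

theorem countGoalItems_eq (l : List Sexpr) (i : Nat) (total : Int) :
    countGoalItems l i total = total + gItems false (l.drop i) := by
  induction hn : l.length - i using Nat.strong_induction_on generalizing i total with
  | _ n ih =>
  by_cases h : i < l.length
  · have hdrop : l.drop i = l[i] :: l.drop (i + 1) := List.drop_eq_getElem_cons h
    rw [countGoalItems, dif_pos h]
    split
    · next s hx =>
      by_cases hs : PySem.Str.startswith s ":" = true
      · have h2 : l.drop (i + 2) = (l.drop (i + 1)).drop 1 := by rw [List.drop_drop]
        rw [if_pos hs, ih (l.length - (i + 2)) (by omega) _ _ rfl, hdrop, hx,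
          gItems, if_pos hs, h2]
        cases hd : l.drop (i + 1) with
        | nil => simp [gItems]
        | cons y ys => simp [gItems]
      · rw [if_neg hs, ih (l.length - (i + 1)) (by omega) _ _ rfl, hdrop, hx, gItems,
          if_neg hs]
        ring
    · next hval hne =>
      rw [ih (l.length - (i + 1)) (by omega) _ _ rfl, hdrop]
      cases hy : l[i] with
      | atom s => exact (hne s hy).elim
      | nil => rw [gItems]; ring
      | cons a b => rw [gItems]; ring
  · rw [countGoalItems]
    simp [h, List.drop_eq_nil_of_le (by omega : l.length ≤ i), gItems]

theorem gItems_eq_inc (t : Sexpr) :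
    gItems false (Sexpr.toList t) = inc .goal t ∧
    gItems true (Sexpr.toList t) = inc .goalSkip t := by
  induction t with
  | atom s => exact ⟨rfl, rfl⟩
  | nil => exact ⟨rfl, rfl⟩
  | cons x xs ihx ih =>
    refine ⟨?_, ?_⟩
    · cases x with
      | atom s =>
        simp only [Sexpr.toList, gItems, inc]
        by_cases hs : PySem.Str.startswith s ":" = true
        · rw [if_pos hs, if_pos hs, ih.2]
        · rw [if_neg hs, if_neg hs, ih.1]
      | nil => simp only [Sexpr.toList, gItems, inc, ih.1]
      | cons a b => simp only [Sexpr.toList, gItems, inc, ih.1]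
    · cases x <;> simp only [Sexpr.toList, gItems, inc, ih.1]

theorem countGoals_eq (t : Sexpr) (total : Int) :
    countGoals (Sexpr.toList t) total = total + inc .goals t := by
  induction t generalizing total with
  | atom s => simp [Sexpr.toList, countGoals, inc_atom]
  | nil => simp [Sexpr.toList, countGoals, inc_nil]
  | cons x xs ihx ih =>
    cases x with
    | atom s => rw [Sexpr.toList, countGoals, ih]; rw [inc]
    | nil => rw [Sexpr.toList, countGoals, ih]; rw [inc, inc_nil]; ring
    | cons y gt =>
      cases y with
      | atom g =>
        by_cases hg : g = "goal"
        · rw [Sexpr.toList, countGoals, if_pos hg, countGoalItems_eq, ih]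
          have hit : Sexpr.toList (.cons (.atom g) gt) = .atom g :: Sexpr.toList gt := rfl
          rw [hit]
          simp only [List.drop_succ_cons, List.drop_zero]
          rw [(gItems_eq_inc gt).1, inc, inc, if_pos hg]
          ring
        · rw [Sexpr.toList, countGoals, if_neg hg, ih, inc, inc, if_neg hg]
          ring
      | nil => rw [Sexpr.toList, countGoals, ih, inc, inc]; ring
      | cons a b => rw [Sexpr.toList, countGoals, ih, inc, inc]; ring

theorem countRoots_eq (roots : List Sexpr) (total : Int) :
    countRoots roots total = total + sumRoots roots := by
  induction roots generalizing total with
  | nil => simp [countRoots, sumRoots]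
  | cons r rs ih =>
    cases r with
    | atom s => rw [countRoots, ih, sumRoots, inc_atom]; ring
    | nil => rw [countRoots, ih, sumRoots, inc_nil]; ring
    | cons x t =>
      cases x with
      | atom s =>
        by_cases hs : s = "goals"
        · rw [countRoots, if_pos hs, countGoals_eq, ih, sumRoots, inc, if_pos hs]
          ring
        · rw [countRoots, if_neg hs, ih, sumRoots, inc, if_neg hs]
          ring
      | nil => rw [countRoots, ih, sumRoots, inc]; ring
      | cons a b => rw [countRoots, ih, sumRoots, inc]; ring

-- the key invariant: running B's machine over the tokens of one (partial) list
-- adds exactly inc fr children to the count, where children is what A's parser builds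
theorem machine_inc (f : Nat) (tokens : List String) (hf : tokens.length ≤ f)
    (c : Int) (fr : PFrame) (fs : List PFrame) :
    (tokens.foldl stepB (c, fr :: fs)).1 =
      ((parseSexpr f tokens).2.foldl stepB (c + inc fr (parseSexpr f tokens).1, fs)).1 := by
  induction f generalizing tokens c fr fs with
  | zero =>
    cases tokens with
    | nil => simp [parseSexpr, inc_nil]
    | cons t rest => exact absurd hf (by simp)
  | succ f ih =>
    cases tokens with
    | nil => simp [parseSexpr, inc_nil]
    | cons t rest =>
      have hrest : rest.length ≤ f := by simp only [List.length_cons] at hf; omega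
      by_cases h1 : t = ")"
      · subst h1
        have hstep : stepB (c, fr :: fs) ")" = (c, fs) := by
          cases fr <;> simp [stepB]
        simp [parseSexpr, List.foldl, hstep, inc_nil]
      · by_cases h2 : t = "("
        · subst h2
          have hr1 : (parseSexpr f rest).2.length ≤ f :=
            le_trans (parseSexpr_length f rest) hrest
          have hunf : parseSexpr (f + 1) ("(" :: rest) =
              (.cons (parseSexpr f rest).1 (parseSexpr f (parseSexpr f rest).2).1,
                (parseSexpr f (parseSexpr f rest).2).2) := by
            simp [parseSexpr]
          have hinc := inc_cons_nonatom fr (parseSexpr f rest).1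
            (parseSexpr f (parseSexpr f rest).2).1 (parseSexpr_isAtom f rest)
          cases fr with
          | goalsCand =>
            have hstep : stepB (c, PFrame.goalsCand :: fs) "(" =
                (c, PFrame.other :: PFrame.other :: fs) := by simp [stepB]
            rw [List.foldl_cons, hstep, ih rest hrest c .other (.other :: fs),
              ih (parseSexpr f rest).2 hr1 _ .other fs, hunf]
            rw [hinc]; simp [inc_other]; try ring_nf
          | goals =>
            have hstep : stepB (c, PFrame.goals :: fs) "(" =
                (c, PFrame.goalCand :: PFrame.goals :: fs) := by simp [stepB]
            rw [List.foldl_cons, hstep, ih rest hrest c .goalCand (.goals :: fs),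
              ih (parseSexpr f rest).2 hr1 _ .goals fs, hunf]
            rw [hinc]; simp [inc_other]; try ring_nf
          | goalCand =>
            have hstep : stepB (c, PFrame.goalCand :: fs) "(" =
                (c, PFrame.other :: PFrame.other :: fs) := by simp [stepB]
            rw [List.foldl_cons, hstep, ih rest hrest c .other (.other :: fs),
              ih (parseSexpr f rest).2 hr1 _ .other fs, hunf]
            rw [hinc]; simp [inc_other]; try ring_nf
          | goal =>
            have hstep : stepB (c, PFrame.goal :: fs) "(" =
                (c + 1, PFrame.other :: PFrame.goal :: fs) := by simp [stepB]
            rw [List.foldl_cons, hstep, ih rest hrest (c + 1) .other (.goal :: fs),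
              ih (parseSexpr f rest).2 hr1 _ .goal fs, hunf]
            rw [hinc]; simp [inc_other]; try ring_nf
          | goalSkip =>
            have hstep : stepB (c, PFrame.goalSkip :: fs) "(" =
                (c, PFrame.other :: PFrame.goal :: fs) := by simp [stepB]
            rw [List.foldl_cons, hstep, ih rest hrest c .other (.goal :: fs),
              ih (parseSexpr f rest).2 hr1 _ .goal fs, hunf]
            rw [hinc]; simp [inc_other]; try ring_nf
          | other =>
            have hstep : stepB (c, PFrame.other :: fs) "(" =
                (c, PFrame.other :: PFrame.other :: fs) := by simp [stepB]
            rw [List.foldl_cons, hstep, ih rest hrest c .other (.other :: fs),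
              ih (parseSexpr f rest).2 hr1 _ .other fs, hunf]
            rw [hinc]; simp [inc_other]; try ring_nf
        · -- plain atom token
          have hunf : parseSexpr (f + 1) (t :: rest) =
              (.cons (.atom t) (parseSexpr f rest).1, (parseSexpr f rest).2) := by
            simp [parseSexpr, h1, h2]
          cases fr with
          | goalsCand =>
            have hstep : stepB (c, PFrame.goalsCand :: fs) t =
                (c, (if t = "goals" then PFrame.goals else PFrame.other) :: fs) := by
              simp [stepB, h1, h2]
            by_cases hg : t = "goals"
            · rw [List.foldl_cons, hstep, if_pos hg, ih rest hrest, hunf]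
              simp [inc, hg]
            · rw [List.foldl_cons, hstep, if_neg hg, ih rest hrest, hunf]
              simp [inc, hg, inc_other]
          | goals =>
            have hstep : stepB (c, PFrame.goals :: fs) t = (c, PFrame.goals :: fs) := by
              simp [stepB, h1, h2]
            rw [List.foldl_cons, hstep, ih rest hrest, hunf]
            simp [inc]
          | goalCand =>
            have hstep : stepB (c, PFrame.goalCand :: fs) t =
                (c, (if t = "goal" then PFrame.goal else PFrame.other) :: fs) := by
              simp [stepB, h1, h2]
            by_cases hg : t = "goal"
            · rw [List.foldl_cons, hstep, if_pos hg, ih rest hrest, hunf]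
              simp [inc, hg]
            · rw [List.foldl_cons, hstep, if_neg hg, ih rest hrest, hunf]
              simp [inc, hg, inc_other]
          | goal =>
            by_cases hk : PySem.Str.startswith t ":" = true
            · have hk' : PySem.Chars.startswith t.toList [':'] = true := by simpa using hk
              have hstep : stepB (c, PFrame.goal :: fs) t = (c, PFrame.goalSkip :: fs) := by
                simp only [stepB]
                rw [if_neg h2, if_neg h1]
                simp [hk']
              rw [List.foldl_cons, hstep, ih rest hrest, hunf]
              rw [inc, if_pos hk]
            · have hk' : PySem.Chars.startswith t.toList [':'] = false := by simpa using hk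
              have hstep : stepB (c, PFrame.goal :: fs) t = (c + 1, PFrame.goal :: fs) := by
                simp only [stepB]
                rw [if_neg h2, if_neg h1]
                simp [hk']
              rw [List.foldl_cons, hstep, ih rest hrest, hunf]
              rw [inc, if_neg hk]; ring_nf
          | goalSkip =>
            have hstep : stepB (c, PFrame.goalSkip :: fs) t = (c, PFrame.goal :: fs) := by
              simp [stepB, h1, h2]
            rw [List.foldl_cons, hstep, ih rest hrest, hunf]
            rw [inc]
          | other =>
            have hstep : stepB (c, PFrame.other :: fs) t = (c, PFrame.other :: fs) := by
              simp [stepB, h1, h2]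
            rw [List.foldl_cons, hstep, ih rest hrest, hunf]
            simp [inc_other]

theorem machine_top (f : Nat) (tokens : List String) (hf : tokens.length ≤ f) (c : Int) :
    (tokens.foldl stepB (c, ([] : List PFrame))).1 = c + sumRoots (parseTop f tokens) := by
  induction f generalizing tokens c with
  | zero =>
    cases tokens with
    | nil => simp [parseTop, sumRoots]
    | cons t rest => exact absurd hf (by simp)
  | succ f ih =>
    cases tokens with
    | nil => simp [parseTop, sumRoots]
    | cons t rest =>
      have hrest : rest.length ≤ f := by simp only [List.length_cons] at hf; omega
      by_cases h2 : t = "("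
      · subst h2
        have hstep : stepB (c, ([] : List PFrame)) "(" = (c, [PFrame.goalsCand]) := by
          simp [stepB]
        have hr : (parseSexpr f rest).2.length ≤ f :=
          le_trans (parseSexpr_length f rest) hrest
        rw [List.foldl_cons, hstep, machine_inc f rest hrest c .goalsCand [],
          ih (parseSexpr f rest).2 hr]
        rw [parseTop]
        simp [sumRoots]
        ring
      · have hstep : stepB (c, ([] : List PFrame)) t = (c, []) := by
          by_cases h1 : t = ")" <;> simp [stepB, h1, h2]
        rw [List.foldl_cons, hstep, ih rest hrest]
        rw [parseTop]
        simp [h2]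

-- the two branch values of A's main function, related to B's machine run
theorem main_key (ts : List String) :
    (if ts = [] then (0 : Int) else countRoots (parseTop ts.length ts) 0) =
      (ts.foldl stepB ((0 : Int), ([] : List PFrame))).1 := by
  by_cases h : ts = []
  · simp [h]
  · rw [if_neg h, machine_top ts.length ts le_rfl 0, countRoots_eq]

-- ===== VERDICT (by name: the statement is the Claim_ definition above) =====
theorem parse_z3_output_clauses_spec : Claim_equal_parse_z3_output_clauses := by
  intro output _
  show parse_z3_output_clauses output = parse_z3_output_clauses_alt output
  exact main_key
    (PySem.Str.split₀ (PySem.Str.replace (PySem.Str.replace output "(" " ( ") ")" " ) "))
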